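-- pv_equiv track=rewrite | github.com/kahuku/competitive_programming | leetcode/maximum-length-of-pair-chain.py | findLongestChain
-- ===== SOURCE A (Python) =====
-- from typing import List
--
-- def findLongestChain(pairs: List[List[int]]) -> int:
--     pairs.sort(key=lambda x: x[1])
--     chain = 0
--     num = float('-inf')
--     for i in range(len(pairs)):
--         if num < pairs[i][0]:
--             num = pairs[i][1]
--             chain += 1
--     return chain
-- ===== SOURCE B (Python) =====
-- def findLongestChain(pairs):
--     pairs.sort(key=lambda x: x[1])
--     if not pairs:
--         return 0
--     n = len(pairs)
--     dp = [1] * n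
--     for i in range(n):
--         for j in range(i):
--             if pairs[j][1] < pairs[i][0]:
--                 dp[i] = max(dp[i], dp[j] + 1)
--     return max(dp)
-- ===== Notes on version B (the rewrite author's own statement) =====
-- stated objective: alternative
-- what changed: Replaces the single-pass greedy counter with an O(n^2) dynamic-programming table of the longest chain ending at each pair (same in-place sort by end).
import Mathlib
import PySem

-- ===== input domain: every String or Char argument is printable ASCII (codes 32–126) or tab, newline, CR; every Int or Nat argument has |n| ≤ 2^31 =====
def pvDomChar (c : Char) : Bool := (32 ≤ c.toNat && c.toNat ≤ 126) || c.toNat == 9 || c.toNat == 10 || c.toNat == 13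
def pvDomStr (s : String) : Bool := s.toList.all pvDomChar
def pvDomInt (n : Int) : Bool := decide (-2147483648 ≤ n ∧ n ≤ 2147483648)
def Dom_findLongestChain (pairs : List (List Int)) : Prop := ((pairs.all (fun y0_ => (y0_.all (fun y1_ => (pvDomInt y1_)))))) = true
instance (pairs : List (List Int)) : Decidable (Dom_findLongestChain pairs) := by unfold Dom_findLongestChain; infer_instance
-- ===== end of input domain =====

-- B replaces A's greedy counter with a DP table of longest chain ending at each pair (same
-- in-place sort of the argument in both Pythons); equivalence is about the return value.

-- ===== PORT A =====
-- x[1] / x[0]: exact under Pre_ (every pair has length ≥ 2), where pyGet? is some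
def pvFst (p : List Int) : Int := (PySem.List.pyGet? p 0).getD 0
def pvSnd (p : List Int) : Int := (PySem.List.pyGet? p 1).getD 0
-- pairs.sort(key=lambda x: x[1]) — both Pythons perform this identical in-place sort
def pvSortByEnd (pairs : List (List Int)) : List (List Int) :=
  PySem.List.sorted pairs (key := pvSnd)
-- num = float('-inf') modelled as none; 'num < x' with num = -inf is always true
def pvNumLt : Option Int → Int → Bool
  | none, _ => true
  | some n, x => decide (n < x)

def findLongestChain (pairs : List (List Int)) : Int :=
  let sp := pvSortByEnd pairs
  (sp.foldl
    (fun (st : Int × Option Int) p =>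
      if pvNumLt st.2 (pvFst p) then (st.1 + 1, some (pvSnd p)) else st)
    ((0 : Int), (none : Option Int))).1

-- ===== PORT B =====
-- inner loop 'for j in range(i): if pairs[j][1] < pairs[i][0]: dp[i] = max(dp[i], dp[j]+1)';
-- done holds the already-processed pairs with their dp values, in order
def pvDpInner (p : List Int) (done : List (List Int × Int)) : Int :=
  done.foldl (fun d qd => if pvSnd qd.1 < pvFst p then max d (qd.2 + 1) else d) 1

-- outer loop over i, extending the dp table one pair at a time
def pvDpOuter : List (List Int × Int) → List (List Int) → List (List Int × Int)
  | done, [] => done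
  | done, p :: rest => pvDpOuter (done ++ [(p, pvDpInner p done)]) rest

def findLongestChain_alt (pairs : List (List Int)) : Int :=
  let sp := pvSortByEnd pairs
  match (pvDpOuter [] sp).map (·.2) with
  | [] => 0                      -- 'if not pairs: return 0'
  | v :: vs => vs.foldl max v    -- max(dp)

-- ===== PRECONDITION & SPEC =====
-- Pre_: exactly the inputs where Python A returns (a pair of length < 2 raises IndexError
-- in the sort key or in the loop body)
def Pre_findLongestChain (pairs : List (List Int)) : Prop :=
  ∀ p ∈ pairs, 2 ≤ p.length
instance (pairs : List (List Int)) : Decidable (Pre_findLongestChain pairs) := by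
  unfold Pre_findLongestChain; infer_instance
def pvWitness_findLongestChain : List (List Int) := [[1, 2], [2, 3], [3, 4]]
def Spec_findLongestChain (pairs : List (List Int)) (out : Int) : Prop := out = findLongestChain_alt pairs
instance (pairs : List (List Int)) (out : Int) : Decidable (Spec_findLongestChain pairs out) := by unfold Spec_findLongestChain; infer_instance

-- ===== CLAIM (what is proved, stated in full; the proofs are below) =====
def Claim_equal_findLongestChain : Prop := ∀ (pairs : List (List Int)), Dom_findLongestChain pairs → Pre_findLongestChain pairs → Spec_findLongestChain pairs (findLongestChain pairs)

-- ===== LEMMAS AND PROOFS =====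

-- greedy step of A's fold
def pvGStep (st : Int × Option Int) (p : List Int) : Int × Option Int :=
  if pvNumLt st.2 (pvFst p) then (st.1 + 1, some (pvSnd p)) else st

-- max of the dp values, seeded with 0
def pvMV (done : List (List Int × Int)) : Int :=
  done.foldl (fun a qd => max a qd.2) 0

-- invariant tying the dp table to the greedy state (G, N) over the processed prefix
def pvInv (done : List (List Int × Int)) (G : Int) (N : Option Int)
    (rest : List (List Int)) : Prop :=
  0 ≤ G ∧
  (N = none → done = [] ∧ G = 0) ∧
  (∀ n, N = some n →
     (∃ qd ∈ done, qd.2 = G ∧ pvSnd qd.1 = n) ∧ (∀ q ∈ rest, n ≤ pvSnd q)) ∧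
  (∀ qd ∈ done,
     1 ≤ qd.2 ∧ qd.2 ≤ G ∧ ∀ n, N = some n → pvSnd qd.1 < n → qd.2 ≤ G - 1)

lemma pv_foldl_init_le (p : List Int) (done : List (List Int × Int)) :
    ∀ a : Int, a ≤ done.foldl (fun d qd => if pvSnd qd.1 < pvFst p then max d (qd.2 + 1) else d) a := by
  induction done with
  | nil => intro a; simp
  | cons q t ih =>
      intro a
      simp only [List.foldl_cons]
      refine le_trans ?_ (ih _)
      split <;> simp

lemma pvDpInner_ge_one (p : List Int) (done : List (List Int × Int)) :
    1 ≤ pvDpInner p done := pv_foldl_init_le p done 1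

lemma pvDpInner_le (p : List Int) (done : List (List Int × Int)) (B : Int)
    (h1 : 1 ≤ B)
    (h : ∀ qd ∈ done, pvSnd qd.1 < pvFst p → qd.2 + 1 ≤ B) :
    pvDpInner p done ≤ B := by
  unfold pvDpInner
  have main : ∀ (l : List (List Int × Int)), (∀ qd ∈ l, pvSnd qd.1 < pvFst p → qd.2 + 1 ≤ B) →
      ∀ a : Int, a ≤ B →
      l.foldl (fun d qd => if pvSnd qd.1 < pvFst p then max d (qd.2 + 1) else d) a ≤ B := by
    intro l
    induction l with
    | nil => intro _ a ha; simpa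
    | cons q t ih =>
        intro hl a ha
        simp only [List.foldl_cons]
        refine ih (fun qd hm => hl qd (List.mem_cons_of_mem _ hm)) _ ?_
        split
        · exact max_le ha (hl q (List.mem_cons_self) (by assumption))
        · exact ha
  exact main done h 1 h1

lemma pvDpInner_ge (p : List Int) (done : List (List Int × Int)) (qd : List Int × Int)
    (hm : qd ∈ done) (hc : pvSnd qd.1 < pvFst p) :
    qd.2 + 1 ≤ pvDpInner p done := by
  unfold pvDpInner
  have main : ∀ (l : List (List Int × Int)), qd ∈ l → ∀ a : Int,
      qd.2 + 1 ≤ l.foldl (fun d qd => if pvSnd qd.1 < pvFst p then max d (qd.2 + 1) else d) a := by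
    intro l
    induction l with
    | nil => intro h; cases h
    | cons q t ih =>
        intro hm a
        rcases List.mem_cons.mp hm with h | h
        · subst h
          simp only [List.foldl_cons, if_pos hc]
          exact le_trans (le_max_right _ _) (pv_foldl_init_le p t _)
        · exact ih h _
  exact main done hm 1

lemma pvMV_append (done : List (List Int × Int)) (x : List Int × Int) :
    pvMV (done ++ [x]) = max (pvMV done) x.2 := by
  simp [pvMV]

lemma pv_main (rest : List (List Int)) :
    ∀ done G N, pvInv done G N rest →
      rest.Pairwise (fun a b => pvSnd a ≤ pvSnd b) →
      pvMV done = G →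
      pvMV (pvDpOuter done rest) = (rest.foldl pvGStep (G, N)).1 := by
  induction rest with
  | nil => intro done G N _ _ hmv; simpa [pvDpOuter] using hmv
  | cons p t ih =>
      intro done G N hinv hpw hmv
      obtain ⟨hG0, hnone, hsome, hbound⟩ := hinv
      have hhead := (List.pairwise_cons.mp hpw).1
      have hpw' := (List.pairwise_cons.mp hpw).2
      rw [show pvDpOuter done (p :: t) = pvDpOuter (done ++ [(p, pvDpInner p done)]) t from rfl]
      rw [List.foldl_cons]
      by_cases h : pvNumLt N (pvFst p) = true
      · cases hN : N with
        | none =>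
            obtain ⟨hd, hg⟩ := hnone hN
            subst hd hN hg
            have hstep : pvGStep (0, none) p = (1, some (pvSnd p)) := by
              simp [pvGStep, pvNumLt]
            rw [hstep, show pvDpInner p [] = 1 from rfl]
            apply ih
            · refine ⟨by omega, by simp, ?_, ?_⟩
              · intro n hn
                simp only [Option.some.injEq] at hn
                refine ⟨⟨(p, 1), by simp, by simp, by simp [hn]⟩, ?_⟩
                intro q hq
                have := hhead q hq
                omega
              · intro qd hqd
                simp only [List.nil_append, List.mem_singleton] at hqd
                subst hqd
                refine ⟨by simp, by simp, ?_⟩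
                intro n hn hlt
                simp only [Option.some.injEq] at hn
                have hlt' : pvSnd p < n := hlt
                omega
            · exact hpw'
            · simp [pvMV]
        | some n =>
            subst hN
            have hn : n < pvFst p := by simpa [pvNumLt] using h
            obtain ⟨⟨qd, hqm, hq2, hqe⟩, hrest⟩ := hsome n rfl
            have hvge : G + 1 ≤ pvDpInner p done := by
              have := pvDpInner_ge p done qd hqm (by rw [hqe]; exact hn)
              omega
            have hvle : pvDpInner p done ≤ G + 1 :=
              pvDpInner_le p done (G + 1) (by omega)
                (fun qd' hm _ => by have := (hbound qd' hm).2.1; omega)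
            have hv : pvDpInner p done = G + 1 := le_antisymm hvle hvge
            have hstep : pvGStep (G, some n) p = (G + 1, some (pvSnd p)) := by
              simp [pvGStep, pvNumLt, hn]
            rw [hstep, hv]
            apply ih
            · refine ⟨by omega, by simp, ?_, ?_⟩
              · intro n' hn'
                simp only [Option.some.injEq] at hn'
                refine ⟨⟨(p, G + 1), by simp, by simp, by simp [hn']⟩, ?_⟩
                intro q hq
                have := hhead q hq
                omega
              · intro qd' hqd'
                rcases List.mem_append.mp hqd' with hm | hm
                · obtain ⟨h1, h2, _⟩ := hbound qd' hm
                  exact ⟨by omega, by omega, fun n' _ _ => by omega⟩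
                · simp only [List.mem_singleton] at hm
                  subst hm
                  refine ⟨by simp; omega, by simp, ?_⟩
                  intro n' hn' hlt
                  simp only [Option.some.injEq] at hn'
                  have hlt' : pvSnd p < n' := hlt
                  omega
            · exact hpw'
            · rw [pvMV_append, hmv]; simp
      · cases hN : N with
        | none => simp [hN, pvNumLt] at h
        | some n =>
            subst hN
            have hn : ¬ n < pvFst p := by simpa [pvNumLt] using h
            obtain ⟨⟨qd, hqm, hq2, hqe⟩, hrest⟩ := hsome n rfl
            have hG1 : 1 ≤ G := by have := (hbound qd hqm).1; omega
            have hple : n ≤ pvSnd p := hrest p (by simp)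
            have hvle : pvDpInner p done ≤ G :=
              pvDpInner_le p done G hG1
                (fun qd' hm hc => by
                  have := (hbound qd' hm).2.2 n rfl (by omega)
                  omega)
            have hv1 : 1 ≤ pvDpInner p done := pvDpInner_ge_one p done
            have hstep : pvGStep (G, some n) p = (G, some n) := by
              simp [pvGStep, pvNumLt, hn]
            rw [hstep]
            apply ih
            · refine ⟨hG0, by simp, ?_, ?_⟩
              · intro n' hn'
                simp only [Option.some.injEq] at hn'
                subst hn'
                refine ⟨⟨qd, List.mem_append_left _ hqm, hq2, hqe⟩, ?_⟩
                intro q hq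
                exact hrest q (by simp [hq])
              · intro qd' hqd'
                rcases List.mem_append.mp hqd' with hm | hm
                · exact hbound qd' hm
                · simp only [List.mem_singleton] at hm
                  subst hm
                  refine ⟨by simpa using hv1, by simpa using hvle, ?_⟩
                  intro n' hn' hlt
                  simp only [Option.some.injEq] at hn'
                  have hlt' : pvSnd p < n' := hlt
                  omega
            · exact hpw'
            · rw [pvMV_append, hmv]
              exact max_eq_left hvle

lemma pv_dpOuter_prefix (rest : List (List Int)) :
    ∀ done, ∃ s, pvDpOuter done rest = done ++ s := by
  induction rest with
  | nil => intro done; exact ⟨[], by simp [pvDpOuter]⟩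
  | cons p t ih =>
      intro done
      obtain ⟨s, hs⟩ := ih (done ++ [(p, pvDpInner p done)])
      exact ⟨(p, pvDpInner p done) :: s, by
        rw [show pvDpOuter done (p :: t) = pvDpOuter (done ++ [(p, pvDpInner p done)]) t from rfl,
          hs]; simp⟩

-- ===== VERDICT (by name: the statement is the Claim_ definition above) =====
theorem findLongestChain_spec : Claim_equal_findLongestChain := by
  intro pairs _ _
  unfold Spec_findLongestChain findLongestChain findLongestChain_alt
  have hfun : (fun (st : Int × Option Int) p =>
      if pvNumLt st.2 (pvFst p) then (st.1 + 1, some (pvSnd p)) else st) = pvGStep := rfl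
  simp only [hfun]
  have hpw : (pvSortByEnd pairs).Pairwise (fun a b => pvSnd a ≤ pvSnd b) :=
    PySem.List.sorted_pairwise pairs pvSnd
  have hinv0 : pvInv [] 0 none (pvSortByEnd pairs) := by
    refine ⟨le_refl 0, fun _ => ⟨rfl, rfl⟩, ?_, ?_⟩ <;> intro x hx <;> simp at hx
  have hmain := pv_main (pvSortByEnd pairs) [] 0 none hinv0 hpw rfl
  cases hsp : pvSortByEnd pairs with
  | nil => simp [pvDpOuter]
  | cons p t =>
      rw [hsp] at hmain
      obtain ⟨s, hs⟩ := pv_dpOuter_prefix t [(p, pvDpInner p [])]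
      have hdp : pvDpOuter [] (p :: t) = (p, (1 : Int)) :: s := by
        rw [show pvDpOuter [] (p :: t) = pvDpOuter [(p, pvDpInner p [])] t from rfl, hs]
        rfl
      rw [hdp] at hmain ⊢
      rw [← hmain]
      simp only [List.map_cons, pvMV, List.foldl_cons, List.foldl_map]
      norm_num
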